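-- pv_equiv track=rewrite | github.com/mohbattharani/Tutorial | util.py | train_val_splitx
-- ===== SOURCE A (Python) =====
-- def train_val_splitx(X):
--     train_x = []
--     val_x = []
--
--     for i in range(len(X)):
--         if (i%5==0):
--             val_x.append(X[i])
--         else:
--             train_x.append(X[i])
--
--     return train_x, val_x
-- ===== SOURCE B (Python) =====
-- def train_val_splitx(X):
--     val_x = list(X[::5])
--     train_x = list(X)
--     del train_x[::5]
--     return train_x, val_x
-- ===== Notes on version B (the rewrite author's own statement) =====
-- stated objective: idiomatic
-- what changed: Replaces the per-index loop with a mod-5 branch by extended slicing: val is X[::5] and train is a copy of X with del train_x[::5] removing those same positions (C-level slice operations instead of a Python-level loop).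
import Mathlib
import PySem

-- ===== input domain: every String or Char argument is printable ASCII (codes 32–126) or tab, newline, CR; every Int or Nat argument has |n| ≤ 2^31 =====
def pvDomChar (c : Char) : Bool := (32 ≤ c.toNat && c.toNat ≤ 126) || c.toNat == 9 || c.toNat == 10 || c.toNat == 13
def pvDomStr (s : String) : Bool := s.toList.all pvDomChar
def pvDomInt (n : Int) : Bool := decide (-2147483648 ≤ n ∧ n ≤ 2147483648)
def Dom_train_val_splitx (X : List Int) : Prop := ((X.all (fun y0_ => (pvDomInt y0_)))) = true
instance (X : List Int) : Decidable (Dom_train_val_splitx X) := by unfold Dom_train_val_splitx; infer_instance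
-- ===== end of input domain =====

-- B drops A's per-index loop with its mod-5 branch and uses extended slicing instead:
-- val is X[::5] and train is a copy of X with del train_x[::5]; same cost, loop-free and idiomatic.

-- ===== PORT A =====
def train_val_splitx (X : List Int) : List Int × List Int :=
  (PySem.List.pyRange 0 (PySem.List.len X) 1).foldl
    (fun acc i =>
      if PySem.Int.mod i 5 = 0 then (acc.1, acc.2 ++ [PySem.List.pyGetD X i 0])
      else (acc.1 ++ [PySem.List.pyGetD X i 0], acc.2))
    ([], [])

-- ===== PORT B =====
def train_val_splitx_alt (X : List Int) : List Int × List Int :=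
  -- X[::5]; step 5 ≠ 0, so slice? always returns a value and getD [] is mere totalisation
  let val_x := (PySem.List.slice? X none none 5).getD []
  -- `del train_x[::5]` deletes exactly the positions 0, 5, 10, …; ported exactly as
  -- keeping the elements whose position is not a multiple of 5.
  let train_x := X.zipIdx.filterMap (fun p => if p.2 % 5 = 0 then none else some p.1)
  (train_x, val_x)

-- ===== PRECONDITION & SPEC =====
def Spec_train_val_splitx (X : List Int) (out : List Int × List Int) : Prop := out = train_val_splitx_alt X
instance (X : List Int) (out : List Int × List Int) : Decidable (Spec_train_val_splitx X out) := by unfold Spec_train_val_splitx; infer_instance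

-- ===== CLAIM (what is proved, stated in full; the proofs are below) =====
def Claim_equal_train_val_splitx : Prop := ∀ (X : List Int), Dom_train_val_splitx X → Spec_train_val_splitx X (train_val_splitx X)

-- ===== LEMMAS AND PROOFS =====

-- A's loop with its running index counter, as structural recursion.
def tvGo (c : Nat) : List Int → List Int × List Int
  | [] => ([], [])
  | x :: xs =>
    let p := tvGo (c + 1) xs
    if c % 5 = 0 then (p.1, x :: p.2) else (x :: p.1, p.2)

-- head-plus-4 chunk recursion (proof skeleton shared by both characterisations)
def tvChunks : List Int → List Int × List Int
  | [] => ([], [])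
  | x :: xs =>
    let p := tvChunks (xs.drop 4)
    (xs.take 4 ++ p.1, x :: p.2)
  termination_by xs => xs.length
  decreasing_by simp

lemma tv_go_period (xs : List Int) : ∀ c, tvGo (c + 5) xs = tvGo c xs := by
  induction xs with
  | nil => intro c; simp [tvGo]
  | cons x xs ih =>
      intro c
      simp only [tvGo, Nat.add_right_comm c 5 1, ih (c + 1), Nat.add_mod_right]

lemma tv_go_five (xs : List Int) : tvGo 5 xs = tvGo 0 xs := tv_go_period xs 0

lemma tv_go_one (xs : List Int) :
    tvGo 1 xs = (xs.take 4 ++ (tvGo 0 (xs.drop 4)).1, (tvGo 0 (xs.drop 4)).2) := by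
  rcases xs with _ | ⟨a, _ | ⟨b, _ | ⟨c, _ | ⟨d, rest⟩⟩⟩⟩ <;>
    · simp [tvGo, tv_go_five]

lemma tv_go_eq_chunks (X : List Int) : tvGo 0 X = tvChunks X := by
  induction X using tvChunks.induct with
  | case1 => simp [tvGo, tvChunks]
  | case2 x xs ih =>
      simp [tvGo, tvChunks, tv_go_one, ih]

lemma tv_foldA (suf : List Int) : ∀ (pre t v : List Int),
    (PySem.List.pyRange (pre.length : Int) (((pre.length + suf.length : Nat) : Int)) 1).foldl
      (fun acc i =>
        if PySem.Int.mod i 5 = 0 then (acc.1, acc.2 ++ [PySem.List.pyGetD (pre ++ suf) i 0])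
        else (acc.1 ++ [PySem.List.pyGetD (pre ++ suf) i 0], acc.2))
      (t, v)
    = (t ++ (tvGo pre.length suf).1, v ++ (tvGo pre.length suf).2) := by
  induction suf with
  | nil =>
      intro pre t v
      rw [PySem.List.pyRange_one_eq_nil (by simp)]
      simp [tvGo]
  | cons x xs ih =>
      intro pre t v
      rw [PySem.List.pyRange_one_cons (by push_cast [List.length_cons]; omega)]
      simp only [List.foldl_cons]
      have hmod : PySem.Int.mod ((pre.length : Nat) : Int) 5 = ((pre.length % 5 : Nat) : Int) := by
        rw [show PySem.Int.mod ((pre.length : Nat) : Int) 5 = ((pre.length : Nat) : Int) % 5 from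
          PySem.Int.mod_eq_emod_of_pos (by norm_num)]
        omega
      have hget : PySem.List.pyGetD (pre ++ x :: xs) ((pre.length : Nat) : Int) 0 = x := by
        simp
      have hrange : PySem.List.pyRange ((pre.length : Int) + 1)
            (((pre.length + (x :: xs).length : Nat) : Int)) 1
          = PySem.List.pyRange (((pre ++ [x]).length : Nat) : Int)
            ((((pre ++ [x]).length + xs.length : Nat) : Int)) 1 := by
        congr 1 <;> simp <;> omega
      have hpre : pre ++ x :: xs = (pre ++ [x]) ++ xs := by simp
      simp only [hmod, hget, Nat.cast_eq_zero]
      by_cases h5 : pre.length % 5 = 0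
      · rw [if_pos h5, hrange, hpre, ih (pre ++ [x]) t (v ++ [x])]
        simp [tvGo, h5]
      · rw [if_neg h5, hrange, hpre, ih (pre ++ [x]) (t ++ [x]) v]
        simp [tvGo, h5]

lemma tv_A_eq_go (X : List Int) : train_val_splitx X = tvGo 0 X := by
  have h := tv_foldA X [] [] []
  simp only [List.length_nil, List.nil_append, Nat.zero_add, Nat.cast_zero] at h
  unfold train_val_splitx
  rw [PySem.List.len_eq]
  exact h

-- B's train side: the position filter computes the train component of A's loop.
lemma tv_train (xs : List Int) : ∀ c,
    (xs.zipIdx c).filterMap (fun p => if p.2 % 5 = 0 then none else some p.1)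
      = (tvGo c xs).1 := by
  induction xs with
  | nil => intro c; simp [tvGo]
  | cons x xs ih =>
      intro c
      by_cases h5 : c % 5 = 0 <;>
        simp [tvGo, List.zipIdx_cons, h5, ih (c + 1)]

-- B's val side, part 1: evaluate slice? at step 5.
lemma tv_slice (X : List Int) :
    PySem.List.slice? X none none 5
      = some ((List.range ((X.length + 4) / 5)).filterMap (fun k => X[5 * k]?)) := by
  simp only [PySem.List.slice?, PySem.List.sliceIndices]
  norm_num
  have hr : (if 0 < X.length then (((X.length : Int) + 5 - 1) / 5).toNat else 0)
      = (X.length + 4) / 5 := by split <;> omega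
  rw [hr]
  refine List.filterMap_congr ?_
  intro k _
  congr 1

-- B's val side, part 2: the stride-5 index gather is the val component of the chunk recursion.
lemma tv_vals (X : List Int) :
    (List.range ((X.length + 4) / 5)).filterMap (fun k => X[5 * k]?) = (tvChunks X).2 := by
  induction X using tvChunks.induct with
  | case1 => simp [tvChunks]
  | case2 x xs ih =>
      have hcnt : ((x :: xs).length + 4) / 5 = ((xs.drop 4).length + 4) / 5 + 1 := by
        simp [List.length_drop]; omega
      rw [hcnt, List.range_succ_eq_map, List.filterMap_cons, List.filterMap_map]
      have hfun : ((fun k => (x :: xs)[5 * k]?) ∘ (fun i => i + 1))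
          = fun k => (xs.drop 4)[5 * k]? := by
        funext k
        have h1 : 5 * (k + 1) = 4 + 1 + (5 * k) := by ring
        simp only [Function.comp, h1, ← List.getElem?_drop,
          List.drop_succ_cons]
      rw [hfun, ih]
      simp [tvChunks]

-- ===== VERDICT (by name: the statement is the Claim_ definition above) =====
theorem train_val_splitx_spec : Claim_equal_train_val_splitx := by
  intro X _
  unfold Spec_train_val_splitx train_val_splitx_alt
  rw [tv_A_eq_go, tv_slice, tv_train X 0, tv_vals, tv_go_eq_chunks]
  rfl
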